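-- pv_equiv track=rewrite | github.com/TanmayRaut058/Python-Programming | Calender.py | cal_printer
-- ===== SOURCE A (Python) =====
-- def cal_printer(mm=1, yy=2020):
--     c = ''
--     month = {
--         1: 'January', 2: 'February', 3: 'March', 4: 'April',
--         5: 'May', 6: 'June', 7: 'July', 8: 'August',
--         9: 'September', 10: 'October', 11: 'November', 12: 'December'
--     }
--     # Calculate the day of the week for the first day of the month
--     day = (yy - 1) % 400
--     day = (day // 100) * 5 + ((day % 100) - (day % 100) // 4) + ((day % 100) // 4) * 2
--     day = day % 7
--
--     nly = [31, 28, 31, 30, 31, 30, 31, 31, 30, 31, 30, 31]  # Non-leap year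
--     ly = [31, 29, 31, 30, 31, 30, 31, 31, 30, 31, 30, 31]  # Leap year
--
--     # Add days of the previous months
--     if yy % 4 == 0 and (yy % 100 != 0 or yy % 400 == 0):
--         s = sum(ly[:mm - 1])
--     else:
--         s = sum(nly[:mm - 1])
--
--     day = (day + s) % 7
--
--     # Generate the calendar header
--     c += (month[mm] + ' ' + str(yy)).center(20, '-') + '\n'
--     c += 'Su Mo Tu We Th Fr Sa\n'
--
--     # Fill initial spaces
--     c += '   ' * day
--
--     # Number of days in the current month
--     days_in_month = ly[mm - 1] if yy % 4 == 0 and (yy % 100 != 0 or yy % 400 == 0) else nly[mm - 1]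
--
--     # Add days to the calendar
--     for date in range(1, days_in_month + 1):
--         c += f'{date:2} '
--         day = (day + 1) % 7
--         if day == 0:
--             c += '\n'
--
--     c += '\n'
--     return c
-- ===== SOURCE B (Python) =====
-- def cal_printer(mm=1, yy=2020):
--     months = ['January', 'February', 'March', 'April', 'May', 'June', 'July',
--               'August', 'September', 'October', 'November', 'December']
--     leap = yy % 4 == 0 and (yy % 100 != 0 or yy % 400 == 0)
--     lengths = [31, 29 if leap else 28, 31, 30, 31, 30, 31, 31, 30, 31, 30, 31]
--     d = (yy - 1) % 400
--     d = (d // 100) * 5 + ((d % 100) - (d % 100) // 4) + ((d % 100) // 4) * 2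
--     first = (d + sum(lengths[:mm - 1])) % 7
--     cells = ['   '] * first + [f'{date:2} ' for date in range(1, lengths[mm - 1] + 1)]
--     rows = [cells[i:i + 7] for i in range(0, len(cells), 7)]
--     header = (months[mm - 1] + ' ' + str(yy)).center(20, '-')
--     body = ''.join(''.join(r) + ('\n' if len(r) == 7 else '') for r in rows)
--     return header + '\nSu Mo Tu We Th Fr Sa\n' + body + '\n'
-- ===== Notes on version B (the rewrite author's own statement) =====
-- stated objective: alternative
-- what changed: B builds the month as a flat list of 3-character cells (' ' padding plus formatted day numbers), slices it into rows of 7, and joins the rows (newline after each complete row), instead of A's streaming character-by-character accumulation with an inline day-counter modulo 7 deciding newlines.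
import Mathlib
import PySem

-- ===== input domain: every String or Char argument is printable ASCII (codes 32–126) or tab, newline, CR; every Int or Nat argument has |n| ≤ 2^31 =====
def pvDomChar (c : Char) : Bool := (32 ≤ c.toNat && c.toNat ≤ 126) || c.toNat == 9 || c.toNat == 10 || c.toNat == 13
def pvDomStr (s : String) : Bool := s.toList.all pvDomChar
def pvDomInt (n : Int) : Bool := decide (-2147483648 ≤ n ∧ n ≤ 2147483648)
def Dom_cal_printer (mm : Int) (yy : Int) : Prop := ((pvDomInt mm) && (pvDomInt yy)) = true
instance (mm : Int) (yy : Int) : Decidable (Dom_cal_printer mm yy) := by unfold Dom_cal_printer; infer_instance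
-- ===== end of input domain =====

-- B builds the month as a flat list of 3-char cells grouped into rows of 7 and joins them,
-- instead of A's streaming character accumulation with an inline day-counter modulo; same cost (alternative decomposition).

-- str.center(20, '-'): exact hand port of CPython's str.center (extra fill char goes on the right)
def pyCenter20 (s : String) : String :=
  let n := s.toList.length
  if 20 ≤ n then s
  else
    let marg := 20 - n
    let left := marg / 2
    String.ofList (List.replicate left '-') ++ s ++ String.ofList (List.replicate (marg - left) '-')

-- f'{date:2} ': width-2 right-aligned; exact for 0 ≤ date ≤ 99 (dates here are 1..31)
def pyFmt2 (date : Int) : String :=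
  (if date < 10 then " " else "") ++ PySem.Int.toStr date ++ " "

-- ===== PORT A =====
-- the dict literal 'month = {...}' of A
def calMonth : PySem.Dict Int String :=
  PySem.Dict.mk [(1, "January"), (2, "February"), (3, "March"), (4, "April"),
    (5, "May"), (6, "June"), (7, "July"), (8, "August"),
    (9, "September"), (10, "October"), (11, "November"), (12, "December")]
def calNly : List Int := [31, 28, 31, 30, 31, 30, 31, 31, 30, 31, 30, 31]
def calLy : List Int := [31, 29, 31, 30, 31, 30, 31, 31, 30, 31, 30, 31]

-- the body of A's 'for date in range(1, days_in_month + 1)' loop, state (c, day)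
def calStep (st : String × Int) (date : Int) : String × Int :=
  let c := st.1 ++ pyFmt2 date
  let day := PySem.Int.mod (st.2 + 1) 7
  let c := if day == 0 then c ++ "\n" else c
  (c, day)

def cal_printer (mm : Int) (yy : Int) : String :=
  let c := ""
  let day := PySem.Int.mod (yy - 1) 400
  let day := PySem.Int.floordiv day 100 * 5 + (PySem.Int.mod day 100 - PySem.Int.floordiv (PySem.Int.mod day 100) 4) + PySem.Int.floordiv (PySem.Int.mod day 100) 4 * 2
  let day := PySem.Int.mod day 7
  let s := if PySem.Int.mod yy 4 == 0 && (PySem.Int.mod yy 100 != 0 || PySem.Int.mod yy 400 == 0)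
           then (PySem.List.slice calLy none (some (mm - 1))).sum
           else (PySem.List.slice calNly none (some (mm - 1))).sum
  let day := PySem.Int.mod (day + s) 7
  -- month[mm]: KeyError for mm outside 1..12, excluded by Pre_; getD's default is never read inside Pre_
  let c := c ++ (pyCenter20 (calMonth.getD mm "" ++ " " ++ PySem.Int.toStr yy) ++ "\n")
  let c := c ++ "Su Mo Tu We Th Fr Sa\n"
  -- '   ' * day  (day ≥ 0 here, so replicate is exact)
  let c := c ++ String.join (List.replicate day.toNat "   ")
  let days_in_month := if PySem.Int.mod yy 4 == 0 && (PySem.Int.mod yy 100 != 0 || PySem.Int.mod yy 400 == 0)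
                       then PySem.List.pyGetD calLy (mm - 1) 0
                       else PySem.List.pyGetD calNly (mm - 1) 0
  let res := (PySem.List.pyRange 1 (days_in_month + 1) 1).foldl calStep (c, day)
  res.1 ++ "\n"

-- ===== PORT B =====
def altMonths : List String :=
  ["January", "February", "March", "April", "May", "June", "July",
   "August", "September", "October", "November", "December"]
def altLengths (leap : Bool) : List Int :=
  [31, if leap then 29 else 28, 31, 30, 31, 30, 31, 31, 30, 31, 30, 31]

def cal_printer_alt (mm : Int) (yy : Int) : String :=
  let leap := PySem.Int.mod yy 4 == 0 && (PySem.Int.mod yy 100 != 0 || PySem.Int.mod yy 400 == 0)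
  let lengths := altLengths leap
  let d := PySem.Int.mod (yy - 1) 400
  let d := PySem.Int.floordiv d 100 * 5 + (PySem.Int.mod d 100 - PySem.Int.floordiv (PySem.Int.mod d 100) 4) + PySem.Int.floordiv (PySem.Int.mod d 100) 4 * 2
  let first := PySem.Int.mod (d + (PySem.List.slice lengths none (some (mm - 1))).sum) 7
  let cells : List String := List.replicate first.toNat "   " ++ (PySem.List.pyRange 1 (PySem.List.pyGetD lengths (mm - 1) 0 + 1) 1).map pyFmt2
  let rows : List (List String) := (PySem.List.pyRange 0 cells.length 7).map (fun i => PySem.List.slice cells (some i) (some (i + 7)))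
  let header := pyCenter20 (PySem.List.pyGetD altMonths (mm - 1) "" ++ " " ++ PySem.Int.toStr yy)
  let body := String.join (rows.map (fun r => String.join r ++ (if r.length == 7 then "\n" else "")))
  header ++ "\nSu Mo Tu We Th Fr Sa\n" ++ body ++ "\n"

-- ===== PRECONDITION & SPEC =====
-- A raises KeyError (month[mm]) for mm outside 1..12; exactly those inputs are excluded.
def Pre_cal_printer (mm : Int) (yy : Int) : Prop := 1 ≤ mm ∧ mm ≤ 12
instance (mm : Int) (yy : Int) : Decidable (Pre_cal_printer mm yy) := by unfold Pre_cal_printer; infer_instance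
def pvWitness_cal_printer : Int × Int := (1, 2020)

def Spec_cal_printer (mm : Int) (yy : Int) (out : String) : Prop := out = cal_printer_alt mm yy
instance (mm : Int) (yy : Int) (out : String) : Decidable (Spec_cal_printer mm yy out) := by unfold Spec_cal_printer; infer_instance

-- ===== CLAIM (what is proved, stated in full; the proofs are below) =====
def Claim_equal_cal_printer : Prop := ∀ (mm : Int) (yy : Int), Dom_cal_printer mm yy → Pre_cal_printer mm yy → Spec_cal_printer mm yy (cal_printer mm yy)

-- ===== LEMMAS AND PROOFS =====

-- (x % 7 + s) % 7 = (x + s) % 7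
theorem pvModFold (a s : Int) : PySem.Int.mod (PySem.Int.mod a 7 + s) 7 = PySem.Int.mod (a + s) 7 := by
  simp only [PySem.Int.mod_eq_emod_of_pos (by norm_num : (0:Int) < 7)]
  omega

-- A's dict lookup equals B's list lookup for every valid month
theorem pvMonthEq (mm : Int) (h1 : 1 ≤ mm) (h2 : mm ≤ 12) :
    calMonth.getD mm "" = PySem.List.pyGetD altMonths (mm - 1) "" := by
  interval_cases mm <;> decide

-- A's branch over ly/nly prefix-sum equals B's prefix-sum of the merged list
theorem pvSumEq (b : Bool) (mm : Int) (h1 : 1 ≤ mm) (h2 : mm ≤ 12) :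
    (if b = true then (PySem.List.slice calLy none (some (mm - 1))).sum
     else (PySem.List.slice calNly none (some (mm - 1))).sum)
    = (PySem.List.slice (altLengths b) none (some (mm - 1))).sum := by
  cases b <;> interval_cases mm <;> decide

theorem pvDimEq (b : Bool) (mm : Int) (h1 : 1 ≤ mm) (h2 : mm ≤ 12) :
    (if b = true then PySem.List.pyGetD calLy (mm - 1) 0
     else PySem.List.pyGetD calNly (mm - 1) 0)
    = PySem.List.pyGetD (altLengths b) (mm - 1) 0 := by
  cases b <;> interval_cases mm <;> decide

theorem pvDimMem (b : Bool) (mm : Int) (h1 : 1 ≤ mm) (h2 : mm ≤ 12) :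
    PySem.List.pyGetD (altLengths b) (mm - 1) 0 = 28 ∨ PySem.List.pyGetD (altLengths b) (mm - 1) 0 = 29 ∨
    PySem.List.pyGetD (altLengths b) (mm - 1) 0 = 30 ∨ PySem.List.pyGetD (altLengths b) (mm - 1) 0 = 31 := by
  cases b <;> interval_cases mm <;> decide

-- pulling the accumulated prefix out of A's loop
theorem calStep_shift (c : String) (d x : Int) :
    calStep (c, d) x = (c ++ (calStep ("", d) x).1, (calStep ("", d) x).2) := by
  simp only [calStep]
  split_ifs <;> simp [String.append_assoc]

theorem calStep_prefix (l : List Int) : ∀ (c : String) (d : Int),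
    l.foldl calStep (c, d) = (c ++ (l.foldl calStep ("", d) ).1, (l.foldl calStep ("", d)).2) := by
  induction l with
  | nil => intro c d; simp
  | cons x xs ih =>
    intro c d
    rw [List.foldl_cons, List.foldl_cons, calStep_shift c d x,
        ih (c ++ (calStep ("", d) x).1) ((calStep ("", d) x).2)]
    conv_rhs => rw [← Prod.mk.eta (p := calStep ("", d) x),
                    ih ((calStep ("", d) x).1) ((calStep ("", d) x).2)]
    simp [String.append_assoc]

-- the part of the output below the weekday header, as each side produces it
def pvTailA (d n : Int) : String :=
  String.join (List.replicate d.toNat "   ") ++ ((PySem.List.pyRange 1 (n + 1) 1).foldl calStep ("", d)).1 ++ "\n"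
def pvTailB (d n : Int) : String :=
  let cells : List String := List.replicate d.toNat "   " ++ (PySem.List.pyRange 1 (n + 1) 1).map pyFmt2
  let rows : List (List String) := (PySem.List.pyRange 0 cells.length 7).map (fun i => PySem.List.slice cells (some i) (some (i + 7)))
  String.join (rows.map (fun r => String.join r ++ (if r.length == 7 then "\n" else ""))) ++ "\n"

theorem pvTail_eq (d n : Int) (h0 : 0 ≤ d) (h7 : d < 7)
    (hn : n = 28 ∨ n = 29 ∨ n = 30 ∨ n = 31) : pvTailA d n = pvTailB d n := by
  rcases hn with rfl | rfl | rfl | rfl <;> interval_cases d <;> decide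

-- reassociating A's accumulated string and bridging to pvTail_eq
theorem pvFinal (H : String) (d n : Int) (h0 : 0 ≤ d) (h7 : d < 7)
    (hn : n = 28 ∨ n = 29 ∨ n = 30 ∨ n = 31) :
    (List.foldl calStep ("" ++ (H ++ "\n") ++ "Su Mo Tu We Th Fr Sa\n" ++ String.join (List.replicate d.toNat "   "), d) (PySem.List.pyRange 1 (n + 1) 1)).1 ++ "\n"
    = H ++ "\nSu Mo Tu We Th Fr Sa\n" ++ String.join ((List.map (fun i => PySem.List.slice (List.replicate d.toNat "   " ++ List.map pyFmt2 (PySem.List.pyRange 1 (n + 1) 1)) (some i) (some (i + 7))) (PySem.List.pyRange 0 (List.replicate d.toNat "   " ++ List.map pyFmt2 (PySem.List.pyRange 1 (n + 1) 1)).length 7)).map (fun r => String.join r ++ if r.length == 7 then "\n" else "")) ++ "\n" := by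
  have h := pvTail_eq d n h0 h7 hn
  simp only [pvTailA, pvTailB] at h
  rw [calStep_prefix]
  rw [show ("\nSu Mo Tu We Th Fr Sa\n" : String) = "\n" ++ "Su Mo Tu We Th Fr Sa\n" from by decide]
  simp only [String.empty_append, String.append_assoc] at h ⊢
  rw [h]

-- ===== VERDICT (by name: the statement is the Claim_ definition above) =====
theorem cal_printer_spec : Claim_equal_cal_printer := by
  intro mm yy _ hpre
  obtain ⟨h1, h2⟩ := hpre
  show cal_printer mm yy = cal_printer_alt mm yy
  simp only [cal_printer, cal_printer_alt]
  rw [pvModFold, pvSumEq _ mm h1 h2, pvDimEq _ mm h1 h2, pvMonthEq mm h1 h2]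
  set b := PySem.Int.mod yy 4 == 0 && (PySem.Int.mod yy 100 != 0 || PySem.Int.mod yy 400 == 0) with hb
  set F := PySem.Int.floordiv (PySem.Int.mod (yy - 1) 400) 100 * 5 + (PySem.Int.mod (PySem.Int.mod (yy - 1) 400) 100 - PySem.Int.floordiv (PySem.Int.mod (PySem.Int.mod (yy - 1) 400) 100) 4) + PySem.Int.floordiv (PySem.Int.mod (PySem.Int.mod (yy - 1) 400) 100) 4 * 2 with hF
  set S := (PySem.List.slice (altLengths b) none (some (mm - 1))).sum with hS
  set N := PySem.List.pyGetD (altLengths b) (mm - 1) 0 with hN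
  set H := pyCenter20 (PySem.List.pyGetD altMonths (mm - 1) "" ++ " " ++ PySem.Int.toStr yy) with hH
  have hn := pvDimMem b mm h1 h2
  rw [← hN] at hn
  have h0 : 0 ≤ PySem.Int.mod (F + S) 7 := PySem.Int.mod_nonneg (F + S) (by norm_num)
  have h7 : PySem.Int.mod (F + S) 7 < 7 := PySem.Int.mod_lt (F + S) (by norm_num)
  set dd := PySem.Int.mod (F + S) 7 with hdd
  clear_value N H
  clear_value dd
  exact pvFinal H dd N h0 h7 hn
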